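-- pv_equiv track=rewrite | github.com/kris0325/CoolDjango | bank_etl/encode_solution.py | leetDecoder
-- ===== SOURCE A (Python) =====
-- def leetDecoder(leetText):
--     leet_map = {
--         '0': 'O', '1': 'I', '2': 'Z', '3': 'E',
--         '7': 'T', '#': 'H', '@': 'A', '$': 'S'
--     }
--
--     words = leetText.split()
--
--     def is_leet_word(word):
--         return any(char in leet_map for char in word)
--
--     result = []
--     for word in words:
--         if is_leet_word(word):
--             decoded_word = ''
--             for char in word:
--                 decoded_word += leet_map.get(char, char)
--             result.append(decoded_word.upper())
--         else:
--             result.append(word.upper())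
--
--     return ' '.join(result)
-- ===== SOURCE B (Python) =====
-- def leetDecoder(leetText):
--     table = str.maketrans({
--         '0': 'O', '1': 'I', '2': 'Z', '3': 'E',
--         '7': 'T', '#': 'H', '@': 'A', '$': 'S'
--     })
--     return ' '.join(w.upper() for w in leetText.translate(table).split())
-- ===== Notes on version B (the rewrite author's own statement) =====
-- stated objective: simpler
-- what changed: Replaces the per-word is_leet_word pre-scan and two-branch decode/accumulate loop with one whole-string str.translate followed by split/upper/join in a single expression.
import Mathlib
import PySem

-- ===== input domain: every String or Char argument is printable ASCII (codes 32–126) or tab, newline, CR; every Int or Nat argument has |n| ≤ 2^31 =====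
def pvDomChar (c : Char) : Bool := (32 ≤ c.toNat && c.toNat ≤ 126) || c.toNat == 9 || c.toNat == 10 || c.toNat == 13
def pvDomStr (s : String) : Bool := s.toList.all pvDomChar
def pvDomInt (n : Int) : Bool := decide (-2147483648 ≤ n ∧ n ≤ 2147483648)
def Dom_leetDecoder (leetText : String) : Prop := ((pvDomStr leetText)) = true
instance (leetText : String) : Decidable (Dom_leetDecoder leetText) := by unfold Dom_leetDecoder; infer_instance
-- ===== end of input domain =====

-- B replaces A's per-word leet pre-scan and two-branch decode loop by one whole-string
-- translation followed by split/upper/join (objective: simpler).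


-- ===== PORT A =====
def leetMapA : PySem.Dict Char Char :=
  ⟨[('0','O'),('1','I'),('2','Z'),('3','E'),('7','T'),('#','H'),('@','A'),('$','S')]⟩

-- 'any(char in leet_map for char in word)'
def isLeetWordA (w : List Char) : Bool := w.any (fun c => (leetMapA.get? c).isSome)

-- the inner decode loop: decoded_word += leet_map.get(char, char)
def decodeWordA (w : List Char) : List Char :=
  w.foldl (fun acc c => acc ++ [leetMapA.getD c c]) []

def leetDecoder (leetText : String) : String :=
  let words := PySem.Str.split₀ leetText
  let result := words.foldl (fun res w =>
    if isLeetWordA w.toList then res ++ [PySem.Str.upper (String.ofList (decodeWordA w.toList))]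
    else res ++ [PySem.Str.upper w]) ([] : List String)
  PySem.Str.join " " result

-- ===== PORT B =====
-- the str.maketrans translation table of Source B, as a function
def trB (c : Char) : Char :=
  if c = '0' then 'O' else if c = '1' then 'I' else if c = '2' then 'Z' else
  if c = '3' then 'E' else if c = '7' then 'T' else if c = '#' then 'H' else
  if c = '@' then 'A' else if c = '$' then 'S' else c

def leetDecoder_alt (leetText : String) : String :=
  PySem.Str.join " "
    ((PySem.Str.split₀ (String.ofList (leetText.toList.map trB))).map PySem.Str.upper)

-- ===== PRECONDITION & SPEC =====
def Spec_leetDecoder (leetText : String) (out : String) : Prop := out = leetDecoder_alt leetText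
instance (leetText : String) (out : String) : Decidable (Spec_leetDecoder leetText out) := by unfold Spec_leetDecoder; infer_instance

-- ===== CLAIM (what is proved, stated in full; the proofs are below) =====
def Claim_equal_leetDecoder : Prop := ∀ (leetText : String), Dom_leetDecoder leetText → Spec_leetDecoder leetText (leetDecoder leetText)

-- ===== LEMMAS AND PROOFS =====

-- trB maps no character into or out of whitespace, so split commutes with it
lemma trB_isspace (c : Char) : PySem.Chars.isspace (trB c) = PySem.Chars.isspace c := by
  unfold trB; split_ifs <;> first | rfl | (subst_vars; decide)

lemma go_map_trB : ∀ (s cur : List Char) (acc : List (List Char)),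
    PySem.Chars.split₀.go (s.map trB) (cur.map trB) (acc.map (List.map trB))
      = (PySem.Chars.split₀.go s cur acc).map (List.map trB) := by
  intro s
  induction s with
  | nil =>
      intro cur acc
      simp only [List.map_nil, PySem.Chars.split₀.go, List.isEmpty_map]
      by_cases h : cur.isEmpty = true
      · rw [if_pos h, if_pos h]; simp
      · rw [if_neg h, if_neg h]; simp [List.map_reverse]
  | cons c rest ih =>
      intro cur acc
      simp only [List.map_cons, PySem.Chars.split₀.go, trB_isspace]
      by_cases hs : PySem.Chars.isspace c = true
      · rw [if_pos hs, if_pos hs]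
        by_cases h : cur.isEmpty = true
        · rw [List.isEmpty_map, if_pos h, if_pos h]
          exact ih [] acc
        · rw [List.isEmpty_map, if_neg h, if_neg h]
          simpa [List.map_reverse] using ih [] (cur.reverse :: acc)
      · rw [if_neg hs, if_neg hs]
        simpa using ih (c :: cur) acc

lemma split₀_map_trB (cs : List Char) :
    PySem.Chars.split₀ (cs.map trB) = (PySem.Chars.split₀ cs).map (List.map trB) := by
  simpa using go_map_trB cs [] []

-- the dict lookup of A agrees with B's translation table
lemma getD_eq_trB (c : Char) : leetMapA.getD c c = trB c := by
  unfold leetMapA trB PySem.Dict.getD PySem.Dict.get?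
  split_ifs with h0 h1 h2 h3 h4 h5 h6 h7
  all_goals try (subst_vars; rfl)
  simp [beq_eq_false_iff_ne.mpr (Ne.symm h0), beq_eq_false_iff_ne.mpr (Ne.symm h1),
        beq_eq_false_iff_ne.mpr (Ne.symm h2), beq_eq_false_iff_ne.mpr (Ne.symm h3),
        beq_eq_false_iff_ne.mpr (Ne.symm h4), beq_eq_false_iff_ne.mpr (Ne.symm h5),
        beq_eq_false_iff_ne.mpr (Ne.symm h6), beq_eq_false_iff_ne.mpr (Ne.symm h7)]

lemma trB_of_not_key {c : Char} (h : (leetMapA.get? c).isSome = false) : trB c = c := by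
  unfold leetMapA PySem.Dict.get? at h
  unfold trB
  split_ifs with h0 h1 h2 h3 h4 h5 h6 h7 <;> subst_vars <;> simp_all [List.find?]

-- A's per-word result equals upper-of-translated word
lemma word_eq (w : String) :
    (if isLeetWordA w.toList then PySem.Str.upper (String.ofList (decodeWordA w.toList))
     else PySem.Str.upper w)
      = PySem.Str.upper (String.ofList (w.toList.map trB)) := by
  by_cases h : isLeetWordA w.toList
  · have : decodeWordA w.toList = w.toList.map trB := by
      unfold decodeWordA
      rw [PySem.List.foldl_append_singleton_eq_map]
      simp [List.map_congr_left fun c _ => getD_eq_trB c]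
    simp [h, this]
  · have h' : w.toList.any (fun c => (leetMapA.get? c).isSome) = false := by
      simpa [isLeetWordA] using h
    have hall : ∀ c ∈ w.toList, trB c = c := by
      intro c hc
      apply trB_of_not_key
      simpa using List.any_eq_false.mp h' c hc
    have hmap : w.toList.map trB = w.toList := by
      have := List.map_congr_left hall
      simpa using this
    rw [if_neg h, hmap, String.ofList_toList]

-- ===== VERDICT (by name: the statement is the Claim_ definition above) =====
theorem leetDecoder_spec : Claim_equal_leetDecoder := by
  intro s _
  simp only [Spec_leetDecoder, leetDecoder, leetDecoder_alt]
  -- turn A's two-branch fold into a map over the words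
  have hfold : ∀ (ws : List String),
      ws.foldl (fun res w =>
        if isLeetWordA w.toList then res ++ [PySem.Str.upper (String.ofList (decodeWordA w.toList))]
        else res ++ [PySem.Str.upper w]) ([] : List String)
      = ws.map (fun w => PySem.Str.upper (String.ofList (w.toList.map trB))) := by
    intro ws
    have : (fun (res : List String) (w : String) =>
        if isLeetWordA w.toList then res ++ [PySem.Str.upper (String.ofList (decodeWordA w.toList))]
        else res ++ [PySem.Str.upper w])
      = (fun res w => res ++ [(fun w => PySem.Str.upper (String.ofList (w.toList.map trB))) w]) := by
      funext res w
      have hw := word_eq w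
      split_ifs with h <;> simp_all
    rw [this, PySem.List.foldl_append_singleton_eq_map]
    simp
  rw [hfold]
  -- B side: commute the translation with the split
  have hB : PySem.Str.split₀ (String.ofList (s.toList.map trB))
      = (PySem.Str.split₀ s).map (fun w => String.ofList (w.toList.map trB)) := by
    unfold PySem.Str.split₀
    rw [String.toList_ofList, split₀_map_trB]
    simp [Function.comp_def]
  rw [hB]
  simp [Function.comp_def]
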